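-- pv_equiv track=rewrite | github.com/saantigh/algoritmos_reemplazo_de_paginas | Algoritmos/algoritmos.py | fifo_mejorado
-- ===== SOURCE A (Python) =====
-- def fifo_mejorado(referencia, num_marcos):
--     """
--     Simula el algoritmo FIFO mejorado (segunda oportunidad) para reemplazo de páginas.
--
--     Parámetros:
--        referencia: lista de páginas referenciadas, e.g. [7, 0, 1, 2, 0, 3, 0, 4, 2, 3, 0, 3, 2, 1, 2, 0]
--        num_marcos: número de marcos disponibles.
--
--     Retorna:
--        - matrix: matriz de (num_marcos+1) filas x len(referencia) columnas, donde las primeras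
--                  num_marcos filas corresponden al estado de cada marco y la última fila indica,
--                  con '*' o '', si hubo fallo en esa referencia.
--        - total_fallos: número total de fallos de página.
--     """
--     n = len(referencia)
--
--     # Inicializamos los marcos: cada marco es un diccionario con 'page' y 'bit'.
--     # None indica que el marco está vacío.
--     frames = [{'page': None, 'bit': False} for _ in range(num_marcos)]
--
--     # Puntero FIFO para recorrer los marcos.
--     pointer = 0
--
--     # Crear la matriz de salida: (num_marcos + 1) filas, n columnas.
--     # Las filas 0..num_marcos-1 son los marcos fijos; la fila num_marcos (última) es para marcar fallos.
--     matrix = [['' for _ in range(n)] for _ in range(num_marcos + 1)]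
--
--     # Lista para registrar fallo de página por columna ( '*' en caso de fallo, '' en caso contrario).
--     fallos = [''] * n
--     total_fallos = 0
--
--     def copiar_columna_anterior(col):
--         if col == 0:
--             return
--         for fila in range(num_marcos + 1):
--             matrix[fila][col] = matrix[fila][col - 1]
--
--     def volcar_estado_en_columna(col):
--         """Volca el estado actual de los frames en la columna 'col' de la matriz."""
--         for f in range(num_marcos):
--             if frames[f]['page'] is None:
--                 matrix[f][col] = ''
--             else:
--                 # Si el bit está activo, se muestra con asterisco; si no, sin asterisco.
--                 matrix[f][col] = f"{frames[f]['page']}{'*' if frames[f]['bit'] else ''}"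
--         # La fila de fallos ya se llenó cuando se produjo el fallo.
--
--     # Procesar cada referencia, de la columna 0 a n-1.
--     for i, page in enumerate(referencia):
--         copiar_columna_anterior(i)
--         # Inicialmente, no se marca fallo en esta columna.
--         matrix[num_marcos][i] = ''
--
--         pages_in_frames = [fr['page'] for fr in frames]
--         if page in pages_in_frames:
--             # Caso HIT: la página ya está en memoria.
--             # Según tu requerimiento, si la página ya está, se debe asignar (o reasignar) el bit a ese marco.
--             idx = pages_in_frames.index(page)
--             # Según el comportamiento deseado, removemos cualquier bit en otros marcos y asignamos solo al marco referenciado.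
--             for fr in frames:
--                 fr['bit'] = False
--             frames[idx]['bit'] = True
--             fallos[i] = ''
--         else:
--             # Caso FALLA de página.
--             total_fallos += 1
--             fallos[i] = '*'
--             # Si hay algún marco vacío, lo usamos
--             free_found = False
--             for f in range(num_marcos):
--                 if frames[f]['page'] is None:
--                     frames[f]['page'] = page
--                     frames[f]['bit'] = False
--                     free_found = True
--                     break
--             if not free_found:
--                 # No hay marco libre: usar FIFO mejorado (segunda oportunidad).
--                 # Recorremos los marcos a partir de 'pointer' hasta encontrar uno sin bit.
--                 replaced = False
--                 while not replaced:
--                     # Si el marco apuntado tiene bit True, lo limpiamos y avanzamos.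
--                     if frames[pointer]['bit']:
--                         frames[pointer]['bit'] = False
--                         pointer = (pointer + 1) % num_marcos
--                     else:
--                         # Este marco no tiene bit, se reemplaza.
--                         frames[pointer]['page'] = page
--                         frames[pointer]['bit'] = False
--                         pointer = (pointer + 1) % num_marcos
--                         replaced = True
--         # Finalmente, actualizamos la columna i con el estado final de frames.
--         volcar_estado_en_columna(i)
--
--     # Colocar la fila de fallos en la matriz:
--     matrix[num_marcos] = fallos[:]
--
--     return matrix, total_fallos
-- ===== SOURCE B (Python) =====
-- def fifo_mejorado(referencia, num_marcos):
--     """Second-chance FIFO simulated with a residency dict (page -> frame), a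
--     frame -> page dict, a FIFO queue of frame indices for the eviction order
--     (a popped frame with the reference bit spends its second chance by moving
--     to the tail), and a single 'star' frame index for the one reference bit
--     that can ever be set; the trace is built as one column snapshot per
--     reference and transposed into rows at the end."""
--     loc = {}                        # page -> frame index holding it
--     slot = {}                       # frame index -> page
--     queue = list(range(num_marcos)) # frames in FIFO (eviction) order
--     next_free = 0                   # frames [0, next_free) are occupied
--     star = None                     # the single frame whose bit is set, if any
--     cols = []
--     fault = []
--     total = 0
--     for page in referencia:
--         if page in loc:
--             star = loc[page]
--             fault.append('')
--         else:
--             total += 1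
--             fault.append('*')
--             if next_free < num_marcos:
--                 f = next_free
--                 next_free += 1
--             else:
--                 f = queue.pop(0)
--                 if f == star:       # second chance: clear the bit, requeue
--                     star = None
--                     queue.append(f)
--                     f = queue.pop(0)
--                 queue.append(f)
--                 del loc[slot[f]]
--             loc[page] = f
--             slot[f] = page
--         cols.append([_render(slot, f, star) for f in range(num_marcos)])
--     rows = [[c[f] for c in cols] for f in range(num_marcos)]
--     return rows + [fault], total
--
-- def _render(slot, f, star):
--     """The matrix cell for frame f: '' if empty, 'page' or 'page*' (bit set)."""
--     if f not in slot:
--         return ''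
--     return str(slot[f]) + ('*' if f == star else '')
-- ===== Notes on version B (the rewrite author's own statement) =====
-- stated objective: alternative
-- what changed: B replaces A's array-of-frames-with-bits simulation by a residency dict giving the hit test and hit index without the pages_in_frames scan or .index, a FIFO queue of frame indices whose pop/requeue realises the second chance for the single frame index that can carry the bit (no clock pointer, no while loop, no per-frame bit flags), and builds the trace as one column snapshot per reference transposed at the end instead of preallocating an (m+1)xn matrix and copying the previous column forward each step.
import Mathlib
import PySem

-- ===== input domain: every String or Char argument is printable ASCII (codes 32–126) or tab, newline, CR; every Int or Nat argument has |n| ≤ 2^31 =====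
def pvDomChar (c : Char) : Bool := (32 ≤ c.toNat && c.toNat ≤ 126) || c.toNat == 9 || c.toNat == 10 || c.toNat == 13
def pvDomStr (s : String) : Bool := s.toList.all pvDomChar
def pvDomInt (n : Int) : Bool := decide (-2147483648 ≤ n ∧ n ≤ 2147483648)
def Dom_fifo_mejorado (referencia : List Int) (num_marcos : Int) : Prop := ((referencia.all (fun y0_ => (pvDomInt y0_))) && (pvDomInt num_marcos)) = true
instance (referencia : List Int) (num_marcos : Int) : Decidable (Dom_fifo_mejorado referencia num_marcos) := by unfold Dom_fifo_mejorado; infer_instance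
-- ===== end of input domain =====

-- B replaces A's array-of-frames-with-bits simulation by a residency dict (page → frame,
-- no pages_in_frames scan or .index), a FIFO queue of frame indices whose pop/requeue
-- realises the second chance for the single frame that can carry the reference bit (no
-- clock pointer, no while loop, no per-frame bit flags), and builds the trace as one
-- column snapshot per reference, transposed at the end, instead of preallocating an
-- (m+1)×n matrix and copying the previous column forward each step. Objective: alternative.

-- ===== PORT A =====

-- matrix[r][c] read / write (A only executes them with in-range nonnegative indices)
def pvGetMat (mat : List (List String)) (r c : Nat) : String := (mat.getD r []).getD c ""

def pvSetMat (mat : List (List String)) (r c : Nat) (v : String) : List (List String) :=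
  mat.set r ((mat.getD r []).set c v)

-- def copiar_columna_anterior(col)
def pvCopiar (nm1 : Nat) (col : Nat) (mat : List (List String)) : List (List String) :=
  if col = 0 then mat
  else (List.range nm1).foldl (fun m fila => pvSetMat m fila col (pvGetMat m fila (col - 1))) mat

-- the string volcar_estado_en_columna writes for frame f
def pvVolcarVal (frames : List (Option Int × Bool)) (f : Nat) : String :=
  match (frames.getD f (none, false)).1 with
  | none => ""
  | some p => PySem.Int.toStr p ++ (if (frames.getD f (none, false)).2 then "*" else "")

-- def volcar_estado_en_columna(col)
def pvVolcar (nm : Nat) (frames : List (Option Int × Bool)) (col : Nat)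
    (mat : List (List String)) : List (List String) :=
  (List.range nm).foldl (fun m f => pvSetMat m f col (pvVolcarVal frames f)) mat

-- termination helper for the while-loop: clearing a set bit decreases the number of set bits
lemma pv_countP_set_false_lt (l : List (Option Int × Bool)) (j : Nat)
    (hb : (l.getD j (none, false)).2 = true) (p : Option Int) :
    (l.set j (p, false)).countP (·.2) < l.countP (·.2) := by
  induction l generalizing j with
  | nil => simp at hb
  | cons a t ih =>
    cases j with
    | zero => simp_all
    | succ j =>
      have := ih j (by simpa using hb)
      simp only [List.set_cons_succ, List.countP_cons]
      omega

-- the 'while not replaced' second-chance loop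
def pvSCLoop (page : Int) (nm : Int) (frames : List (Option Int × Bool)) (pointer : Int) :
    List (Option Int × Bool) × Int :=
  if hb : (frames.getD pointer.toNat (none, false)).2 = true then
    pvSCLoop page nm (frames.set pointer.toNat ((frames.getD pointer.toNat (none, false)).1, false))
      (PySem.Int.mod (pointer + 1) nm)
  else
    (frames.set pointer.toNat (some page, false), PySem.Int.mod (pointer + 1) nm)
termination_by frames.countP (·.2)
decreasing_by exact pv_countP_set_false_lt frames pointer.toNat hb _

-- body of 'for i, page in enumerate(referencia)'
def pvStepA (nm : Int) (st : List (Option Int × Bool) × Int × List (List String) × List String × Int)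
    (i : Nat) (page : Int) :
    List (Option Int × Bool) × Int × List (List String) × List String × Int :=
  match st with
  | (frames, pointer, matrix, fallos, total) =>
    let matrix := pvCopiar (nm + 1).toNat i matrix
    let matrix := pvSetMat matrix nm.toNat i ""
    let pages := frames.map (·.1)
    if (some page) ∈ pages then
      let idx := (PySem.List.index? pages (some page)).getD 0
      let cleared := frames.map (fun fr => (fr.1, false))
      let frames := cleared.set idx ((cleared.getD idx (none, false)).1, true)
      let fallos := fallos.set i ""
      let matrix := pvVolcar nm.toNat frames i matrix
      (frames, pointer, matrix, fallos, total)
    else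
      let total := total + 1
      let fallos := fallos.set i "*"
      match (List.range nm.toNat).find? (fun f => (frames.getD f (none, false)).1 == none) with
      | some f =>
        let frames := frames.set f (some page, false)
        let matrix := pvVolcar nm.toNat frames i matrix
        (frames, pointer, matrix, fallos, total)
      | none =>
        match pvSCLoop page nm frames pointer with
        | (frames, pointer) =>
          let matrix := pvVolcar nm.toNat frames i matrix
          (frames, pointer, matrix, fallos, total)

def pvLoopA (nm : Int) (l : List Int) (i : Nat)
    (st : List (Option Int × Bool) × Int × List (List String) × List String × Int) :
    List (Option Int × Bool) × Int × List (List String) × List String × Int :=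
  match l with
  | [] => st
  | page :: rest => pvLoopA nm rest (i + 1) (pvStepA nm st i page)

def fifo_mejorado (referencia : List Int) (num_marcos : Int) : List (List String) × Int :=
  let n := referencia.length
  let frames := List.replicate num_marcos.toNat ((none : Option Int), false)
  let matrix := List.replicate (num_marcos + 1).toNat (List.replicate n "")
  let fallos := List.replicate n ""
  match pvLoopA num_marcos referencia 0 (frames, 0, matrix, fallos, 0) with
  | (_, _, matrix, fallos, total) => (matrix.set num_marcos.toNat fallos, total)

-- ===== PORT B =====

-- def _render(slot, f, star)
def pvRender (slot : PySem.Dict Int Int) (f : Int) (star : Option Int) : String :=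
  match PySem.Dict.get? slot f with
  | none => ""
  | some p => PySem.Int.toStr p ++ (if star = some f then "*" else "")

-- body of 'for page in referencia'; B-state = (loc, slot, queue, next_free, star, cols, fault, total)
def pvStepB (nm : Int)
    (st : PySem.Dict Int Int × PySem.Dict Int Int × List Int × Int × Option Int ×
          List (List String) × List String × Int) (page : Int) :
    PySem.Dict Int Int × PySem.Dict Int Int × List Int × Int × Option Int ×
      List (List String) × List String × Int :=
  match st with
  | (loc, slot, queue, nf, star, cols, fault, total) =>
    let s :=
      match PySem.Dict.get? loc page with
      | some fr => (loc, slot, queue, nf, some fr, fault ++ [""], total)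
      | none =>
        let total := total + 1
        let fault := fault ++ ["*"]
        if nf < nm then
          (PySem.Dict.insert loc page nf, PySem.Dict.insert slot nf page, queue, nf + 1,
           star, fault, total)
        else
          -- queue.pop(0): Python raises on an empty queue; that branch is outside Pre_
          match PySem.List.pop? queue 0 with
          | none => (loc, slot, queue, nf, star, fault, total)
          | some (f0, q0) =>
            let sqf :=
              if star = some f0 then
                match PySem.List.pop? (q0 ++ [f0]) 0 with
                | none => ((none : Option Int), q0 ++ [f0], f0)
                | some (f1, q1) => ((none : Option Int), q1, f1)
              else (star, q0, f0)
            match sqf with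
            | (star, queue, f) =>
              let queue := queue ++ [f]
              -- del loc[slot[f]] (slot[f] is always present here)
              let loc := match PySem.Dict.get? slot f with
                         | some old => PySem.Dict.erase loc old
                         | none => loc
              (PySem.Dict.insert loc page f, PySem.Dict.insert slot f page, queue, nf,
               star, fault, total)
    match s with
    | (loc, slot, queue, nf, star, fault, total) =>
      (loc, slot, queue, nf, star,
       cols ++ [(PySem.List.pyRange 0 nm 1).map (fun f => pvRender slot f star)], fault, total)

def fifo_mejorado_alt (referencia : List Int) (num_marcos : Int) : List (List String) × Int :=
  match referencia.foldl (pvStepB num_marcos)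
      (PySem.Dict.empty, PySem.Dict.empty, PySem.List.pyRange 0 num_marcos 1, (0 : Int),
       (none : Option Int), ([] : List (List String)), ([] : List String), (0 : Int)) with
  | (_, _, _, _, _, cols, fault, total) =>
    (((PySem.List.pyRange 0 num_marcos 1).map
        (fun f => cols.map (fun c => (PySem.List.pyGet? c f).getD ""))) ++ [fault], total)

-- ===== PRECONDITION & SPEC =====

-- Pre_ excludes exactly the inputs on which A raises IndexError (num_marcos ≤ 0 with a
-- nonempty reference string, or num_marcos < 0): there A returns no value at all.
def Pre_fifo_mejorado (referencia : List Int) (num_marcos : Int) : Prop :=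
  1 ≤ num_marcos ∨ (num_marcos = 0 ∧ referencia = [])

instance (referencia : List Int) (num_marcos : Int) : Decidable (Pre_fifo_mejorado referencia num_marcos) := by
  unfold Pre_fifo_mejorado; infer_instance

def pvWitness_fifo_mejorado : List Int × Int := ([7, 0, 1, 2, 0, 3, 0, 4, 2, 3, 0], 3)

def Spec_fifo_mejorado (referencia : List Int) (num_marcos : Int) (out : List (List String) × Int) : Prop := out = fifo_mejorado_alt referencia num_marcos
instance (referencia : List Int) (num_marcos : Int) (out : List (List String) × Int) : Decidable (Spec_fifo_mejorado referencia num_marcos out) := by unfold Spec_fifo_mejorado; infer_instance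

-- ===== CLAIM (what is proved, stated in full; the proofs are below) =====
def Claim_equal_fifo_mejorado : Prop := ∀ (referencia : List Int) (num_marcos : Int), Dom_fifo_mejorado referencia num_marcos → Pre_fifo_mejorado referencia num_marcos → Spec_fifo_mejorado referencia num_marcos (fifo_mejorado referencia num_marcos)

-- ===== LEMMAS AND PROOFS =====

-- ---- proof-only intermediate program: A's frame list abstracted to a page list with a
-- ---- single optional bit index and row-wise output accumulation (bridge between A and B)

def pvEmit (reprs : List String) (bitIdx : Option Int) (rows : List (List String)) :
    List (List String) :=
  let rs := rows.mapIdx (fun f row => row ++ [reprs.getD f ""])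
  match bitIdx with
  | none => rs
  | some b =>
    rs.set b.toNat
      ((rs.getD b.toNat []).set ((rs.getD b.toNat []).length - 1) (reprs.getD b.toNat "" ++ "*"))

def pvStepMid (nm : Int)
    (st : List (Option Int) × Option Int × Int × List String × List (List String) × List String × Int)
    (page : Int) :
    List (Option Int) × Option Int × Int × List String × List (List String) × List String × Int :=
  match st with
  | (pages, bitIdx, pointer, reprs, rows, fault, total) =>
    let s :=
      if (some page) ∈ pages then
        (pages, some ((((PySem.List.index? pages (some page)).getD 0 : Nat)) : Int), pointer,
         reprs, fault ++ [""], total)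
      else
        let total := total + 1
        let fault := fault ++ ["*"]
        if (none : Option Int) ∈ pages then
          let f := (PySem.List.index? pages none).getD 0
          (pages.set f (some page), bitIdx, pointer, reprs.set f (PySem.Int.toStr page),
           fault, total)
        else
          let bp :=
            if bitIdx = some pointer then ((none : Option Int), PySem.Int.mod (pointer + 1) nm)
            else (bitIdx, pointer)
          (pages.set bp.2.toNat (some page), bp.1, PySem.Int.mod (bp.2 + 1) nm,
           reprs.set bp.2.toNat (PySem.Int.toStr page), fault, total)
    match s with
    | (pages, bitIdx, pointer, reprs, fault, total) =>
      (pages, bitIdx, pointer, reprs, pvEmit reprs bitIdx rows, fault, total)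

def pvMid (referencia : List Int) (num_marcos : Int) : List (List String) × Int :=
  match referencia.foldl (pvStepMid num_marcos)
      (List.replicate num_marcos.toNat (none : Option Int), (none : Option Int), (0 : Int),
       List.replicate num_marcos.toNat "",
       List.replicate num_marcos.toNat ([] : List String), ([] : List String), (0 : Int)) with
  | (_, _, _, _, rows, fault, total) => (rows ++ [fault], total)

-- proof-only: the cell a frame contributes to the matrix ('', 'page' or 'page*')
def pvCell (p : Option Int) (f : Nat) (bitIdx : Option Int) : String :=
  match p with
  | none => ""
  | some q => PySem.Int.toStr q ++ (if bitIdx = some (f : Int) then "*" else "")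

-- proof-only: the unstarred rendering of a frame's page
def pvCell0 (p : Option Int) : String :=
  match p with
  | none => ""
  | some q => PySem.Int.toStr q

-- proof-only abstraction: the mid page list with its single optional bit index realises
-- A's frame list of (page, bit) pairs
def pvZ (pages : List (Option Int)) (bi : Option Int) : List (Option Int × Bool) :=
  pages.mapIdx (fun j p => (p, decide (bi = some (j : Int))))

-- abstraction of the mid loop state into A's (appending the always-blank fault row A
-- keeps inside the matrix until the end)
def pvAbs (N : Nat)
    (s : List (Option Int) × Option Int × Int × List String × List (List String) × List String × Int) :
    List (Option Int × Bool) × Int × List (List String) × List String × Int :=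
  (pvZ s.1 s.2.1, s.2.2.1, s.2.2.2.2.1 ++ [List.replicate N ""], s.2.2.2.2.2.1, s.2.2.2.2.2.2)

lemma pvZ_length (pages : List (Option Int)) (bi : Option Int) :
    (pvZ pages bi).length = pages.length := by simp [pvZ]

lemma pvZ_getElem (pages : List (Option Int)) (bi : Option Int) (j : Nat) (hj : j < pages.length) :
    (pvZ pages bi)[j]'(by simpa [pvZ] using hj) = (pages[j], decide (bi = some (j : Int))) := by
  simp [pvZ]

lemma pvZ_getD (pages : List (Option Int)) (bi : Option Int) (j : Nat) (hj : j < pages.length) :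
    (pvZ pages bi).getD j (none, false) = (pages.getD j none, decide (bi = some (j : Int))) := by
  rw [List.getD_eq_getElem _ _ (by simpa [pvZ] using hj), List.getD_eq_getElem _ _ hj,
    pvZ_getElem pages bi j hj]

lemma pvZ_map_fst (pages : List (Option Int)) (bi : Option Int) :
    (pvZ pages bi).map (·.1) = pages := by
  apply List.ext_getElem <;> simp [pvZ]

lemma pvZ_map_clear (pages : List (Option Int)) (bi : Option Int) :
    (pvZ pages bi).map (fun fr => (fr.1, false)) = pvZ pages none := by
  apply List.ext_getElem <;> simp [pvZ]

lemma pvZ_set_true (pages : List (Option Int)) (j : Nat) (hj : j < pages.length) :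
    (pvZ pages none).set j (pages.getD j none, true) = pvZ pages (some (j : Int)) := by
  apply List.ext_getElem
  · simp [pvZ]
  · intro k h1 h2
    rw [List.getElem_set]
    have hk : k < pages.length := by simpa [pvZ] using h2
    rw [pvZ_getElem pages none k hk, pvZ_getElem pages (some (j:Int)) k hk]
    split_ifs with h
    · subst h; rw [List.getD_eq_getElem _ _ hj]; simp
    · have : ¬ ((j : Int) = (k : Int)) := by omega
      simp [this]

lemma pvZ_set_clearAt (pages : List (Option Int)) (j : Nat) (hj : j < pages.length) :
    (pvZ pages (some (j : Int))).set j (pages.getD j none, false) = pvZ pages none := by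
  apply List.ext_getElem
  · simp [pvZ]
  · intro k h1 h2
    rw [List.getElem_set]
    have hk : k < pages.length := by simpa [pvZ] using h2
    rw [pvZ_getElem pages (some (j:Int)) k hk, pvZ_getElem pages none k hk]
    split_ifs with h
    · subst h; rw [List.getD_eq_getElem _ _ hj]; simp
    · have : ¬ ((j : Int) = (k : Int)) := by omega
      simp [this]

lemma pvZ_set_false (pages : List (Option Int)) (bi : Option Int) (j : Nat) (v : Option Int)
    (hbi : bi ≠ some (j : Int)) :
    (pvZ pages bi).set j (v, false) = pvZ (pages.set j v) bi := by
  apply List.ext_getElem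
  · simp [pvZ]
  · intro k h1 h2
    rw [List.getElem_set]
    have hk : k < pages.length := by simpa [pvZ] using h1
    rw [pvZ_getElem (pages.set j v) bi k (by simpa using hk)]
    split_ifs with h
    · subst h; simp [hbi]
    · rw [pvZ_getElem pages bi k hk]
      simp [h]

lemma pvZ_replicate (k : Nat) :
    pvZ (List.replicate k none) none = List.replicate k ((none : Option Int), false) := by
  apply List.ext_getElem <;> simp [pvZ]

-- A's first-free-frame scan is pages.index(None)
lemma pv_find_range (frames : List (Option Int × Bool)) :
    (List.range frames.length).find? (fun f => (frames.getD f (none, false)).1 == none)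
      = PySem.List.index? (frames.map (·.1)) none := by
  induction frames with
  | nil => simp [PySem.List.index?]
  | cons a t ih =>
    rw [List.length_cons, List.range_succ_eq_map, List.find?_cons]
    by_cases ha : a.1 = none
    · simp [ha, List.idxOf?_cons]
    · have ha' : (a.1 == (none : Option Int)) = false := by cases hx : a.1 <;> simp_all
      simp only [List.getD_cons_zero, ha', List.find?_map]
      rw [List.map_cons, PySem.List.index?_cons_of_ne _ ha]
      rw [← ih]
      rfl

-- the two output-cell formatters agree through the abstraction
lemma pv_volcarVal_cell (pages : List (Option Int)) (bi : Option Int) (f : Nat)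
    (hf : f < pages.length) :
    pvVolcarVal (pvZ pages bi) f = pvCell (pages.getD f none) f bi := by
  rw [pvVolcarVal, pvZ_getD pages bi f hf]
  cases hp : pages.getD f none with
  | none => simp [pvCell]
  | some q =>
    simp only [pvCell]
    by_cases hb : bi = some (f : Int) <;> simp [hb]

lemma pv_mapIdx_congr {α β : Type} (l : List α) (f g : Nat → α → β)
    (h : ∀ j (hj : j < l.length), f j l[j] = g j l[j]) : l.mapIdx f = l.mapIdx g := by
  apply List.ext_getElem
  · simp
  · intro k h1 h2
    rw [List.getElem_mapIdx, List.getElem_mapIdx]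
    exact h k (by simpa using h1)

-- a column-write loop with values independent of the matrix
lemma pv_foldSet_const (col : Nat) (g : Nat → String) :
    ∀ (K : Nat) (mat : List (List String)),
    (List.range K).foldl (fun m f => pvSetMat m f col (g f)) mat
      = mat.mapIdx (fun f row => if f < K then row.set col (g f) else row) := by
  intro K
  induction K with
  | zero =>
    intro mat
    simp only [List.range_zero, List.foldl_nil]
    apply List.ext_getElem <;> simp
  | succ K ih =>
    intro mat
    rw [List.range_succ, List.foldl_append, ih mat, List.foldl_cons, List.foldl_nil]
    by_cases hK : K < mat.length
    · apply List.ext_getElem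
      · simp [pvSetMat]
      · intro k h1 h2
        have hk : k < mat.length := by simpa [pvSetMat] using h1
        simp only [pvSetMat]
        rw [List.getElem_set]
        split_ifs with h
        · subst h
          rw [List.getD_eq_getElem _ _ (by simpa using hK), List.getElem_mapIdx,
            List.getElem_mapIdx]
          simp
        · rw [List.getElem_mapIdx, List.getElem_mapIdx]
          by_cases hlt : k < K
          · simp [hlt, Nat.lt_succ_of_lt hlt]
          · have : ¬ k < K + 1 := by omega
            simp [hlt, this]
    · have hsame : mat.mapIdx (fun f row => if f < K + 1 then row.set col (g f) else row)
          = mat.mapIdx (fun f row => if f < K then row.set col (g f) else row) := by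
        apply pv_mapIdx_congr
        intro j hj
        have : j < K := by omega
        simp [this, Nat.lt_succ_of_lt this]
      rw [hsame]
      simp only [pvSetMat]
      rw [List.set_eq_of_length_le (by simpa using Nat.le_of_not_lt hK)]

-- the copy-previous-column loop (each write reads only its own row)
lemma pv_foldSet_copy (col : Nat) :
    ∀ (K : Nat) (mat : List (List String)),
    (List.range K).foldl (fun m fila => pvSetMat m fila col (pvGetMat m fila (col - 1))) mat
      = mat.mapIdx (fun f row => if f < K then row.set col (row.getD (col - 1) "") else row) := by
  intro K
  induction K with
  | zero =>
    intro mat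
    simp only [List.range_zero, List.foldl_nil]
    apply List.ext_getElem <;> simp
  | succ K ih =>
    intro mat
    rw [List.range_succ, List.foldl_append, ih mat, List.foldl_cons, List.foldl_nil]
    by_cases hK : K < mat.length
    · have hrowK : (mat.mapIdx (fun f row => if f < K then row.set col (row.getD (col - 1) "") else row)).getD K []
        = mat[K] := by
        rw [List.getD_eq_getElem _ _ (by simpa using hK), List.getElem_mapIdx]
        simp
      apply List.ext_getElem
      · simp [pvSetMat]
      · intro k h1 h2
        have hk : k < mat.length := by simpa [pvSetMat] using h1
        simp only [pvSetMat, pvGetMat]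
        rw [List.getElem_set]
        split_ifs with h
        · subst h
          rw [hrowK, List.getElem_mapIdx]
          simp
        · rw [List.getElem_mapIdx, List.getElem_mapIdx]
          by_cases hlt : k < K
          · simp [hlt, Nat.lt_succ_of_lt hlt]
          · have : ¬ k < K + 1 := by omega
            simp [hlt, this]
    · have hsame : mat.mapIdx (fun f row => if f < K + 1 then row.set col (row.getD (col - 1) "") else row)
          = mat.mapIdx (fun f row => if f < K then row.set col (row.getD (col - 1) "") else row) := by
        apply pv_mapIdx_congr
        intro j hj
        have : j < K := by omega
        simp [this, Nat.lt_succ_of_lt this]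
      rw [hsame]
      simp only [pvSetMat]
      rw [List.set_eq_of_length_le (by simpa using Nat.le_of_not_lt hK)]

-- writing into the first blank pad cell of a row
lemma pv_set_pad (r : List String) (k : Nat) (v : String) :
    (r ++ List.replicate (k + 1) "").set r.length v = (r ++ [v]) ++ List.replicate k "" := by
  rw [List.set_append]
  simp [List.replicate_succ]

lemma pv_set_replicate (N i : Nat) :
    (List.replicate N ("" : String)).set i "" = List.replicate N "" := by
  apply List.ext_getElem
  · simp
  · intro k h1 h2
    rw [List.getElem_set]
    split_ifs <;> simp

-- A's whole matrix manipulation for one reference (copy column, blank fault cell, dump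
-- frame states) is: append one formatted cell to each row, keep one fewer pad column
lemma pv_stepA_matrix (m' i k N : Nat) (rows : List (List String))
    (frames' : List (Option Int × Bool))
    (hrows : rows.length = m') (hlenr : ∀ r ∈ rows, r.length = i) (hN : N = i + (k + 1)) :
    pvVolcar m' frames' i
      (pvSetMat (pvCopiar (m' + 1) i
        (rows.map (· ++ List.replicate (k + 1) "") ++ [List.replicate N ""])) m' i "")
    = (rows.mapIdx (fun f r => r ++ [pvVolcarVal frames' f])).map (· ++ List.replicate k "")
      ++ [List.replicate N ""] := by
  have hPlen : (rows.map (· ++ List.replicate (k + 1) "") ++ [List.replicate N ""]).length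
      = m' + 1 := by simp [hrows]
  set P := rows.map (· ++ List.replicate (k + 1) "") ++ [List.replicate N ""] with hP
  have hC : pvCopiar (m' + 1) i P
      = P.mapIdx (fun f row =>
          if i = 0 then row else row.set i (row.getD (i - 1) "")) := by
    rw [pvCopiar]
    split_ifs with hi
    · apply List.ext_getElem?
      intro j
      rw [List.getElem?_mapIdx]
      cases hPj : P[j]? <;> simp
    · rw [pv_foldSet_copy]
      apply pv_mapIdx_congr
      intro j hj
      have : j < m' + 1 := by omega
      simp [this]
  simp only [pvVolcar]
  rw [pv_foldSet_const, hC]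
  simp only [pvSetMat]
  apply List.ext_getElem?
  intro j
  rcases lt_trichotomy j m' with hj | hj | hj
  · -- a frame row: old row with one formatted cell appended, one fewer pad column
    have hjr : j < rows.length := by omega
    have hrl : rows[j].length = i := hlenr _ (List.getElem_mem hjr)
    have hPj : P[j]? = some (rows[j] ++ List.replicate (k + 1) "") := by
      rw [hP, List.getElem?_append_left (by simpa using hjr), List.getElem?_map,
        List.getElem?_eq_getElem hjr, Option.map_some]
    have hne : ¬ (m' = j) := by omega
    rw [List.getElem?_mapIdx, List.getElem?_set, if_neg hne, List.getElem?_mapIdx, hPj,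
      List.getElem?_append_left (by simp [hrows]; omega), List.getElem?_map,
      List.getElem?_mapIdx, List.getElem?_eq_getElem hjr]
    simp only [Option.map_some]
    congr 1
    have hset : ∀ v : String, (rows[j] ++ List.replicate (k + 1) "").set i v
        = (rows[j] ++ [v]) ++ List.replicate k "" := by
      intro v; rw [← hrl, pv_set_pad]
    simp only [if_pos hj]
    split_ifs with hi
    · rw [hset]
    · rw [List.set_set, hset]
  · -- the fault row: stays all-blank through the step
    subst hj
    have hPm : P[j]? = some (List.replicate N "") := by
      rw [hP, List.getElem?_append_right (by simp [hrows])]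
      simp [hrows]

    have hlen2 : j < (P.mapIdx fun f row =>
        if i = 0 then row else row.set i (row.getD (i - 1) "")).length := by
      rw [List.length_mapIdx, hPlen]; omega
    have hrow : (P.mapIdx fun f row =>
          if i = 0 then row else row.set i (row.getD (i - 1) "")).getD j []
        = List.replicate N "" := by
      rw [List.getD_eq_getElem?_getD, List.getElem?_mapIdx, hPm, Option.map_some]
      simp only [Option.getD_some]
      split_ifs with hi
      · rfl
      · have hval : (List.replicate N ("" : String)).getD (i - 1) "" = "" := by
          by_cases hb : i - 1 < N
          · exact List.getD_replicate _ hb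
          · rw [List.getD_eq_default _ _ (by omega)]
        rw [hval, pv_set_replicate]
    rw [List.getElem?_mapIdx, List.getElem?_set, if_pos rfl, if_pos hlen2, hrow,
      pv_set_replicate, List.getElem?_append_right (by simp [hrows]), Option.map_some]
    simp [hrows]
  · -- past the fault row: both sides have no entry
    rw [List.getElem?_eq_none (by simp; omega),
      List.getElem?_eq_none (by simp [hrows]; omega)]

lemma pv_emit_length (reprs : List String) (bi : Option Int) (rows : List (List String)) :
    (pvEmit reprs bi rows).length = rows.length := by
  unfold pvEmit
  cases bi <;> simp

-- the mid step keeps the number of rows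
lemma pv_foldMid_rows_len (nm : Int) :
    ∀ (l : List Int)
      (st : List (Option Int) × Option Int × Int × List String × List (List String) × List String × Int),
    ((l.foldl (pvStepMid nm) st).2.2.2.2.1).length = st.2.2.2.2.1.length := by
  intro l
  induction l with
  | nil => intro st; rfl
  | cons a t ih =>
    intro st
    rw [List.foldl_cons, ih]
    obtain ⟨pages, bitIdx, pointer, reprs, rows, fault, total⟩ := st
    simp only [pvStepMid]
    split <;> simp [pv_emit_length]

-- appending the cached cells (starring the bit frame) is appending the formatted cells
lemma pv_emit_eq (pages : List (Option Int)) (reprs : List String) (rows : List (List String))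
    (i : Nat) (bi : Option Int)
    (_hlen : reprs.length = pages.length) (hrlen : rows.length = pages.length)
    (hrowlen : ∀ r ∈ rows, r.length = i)
    (hreprs : ∀ f, f < pages.length → reprs.getD f "" = pvCell0 (pages.getD f none))
    (hbi : ∀ b : Int, bi = some b → 0 ≤ b ∧ b.toNat < pages.length ∧ pages.getD b.toNat none ≠ none) :
    pvEmit reprs bi rows = rows.mapIdx fun f r => r ++ [pvCell (pages.getD f none) f bi] := by
  unfold pvEmit
  cases bi with
  | none =>
    apply pv_mapIdx_congr
    intro j hj
    rw [hreprs j (by omega)]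
    cases hp : pages.getD j none <;> simp [pvCell0, pvCell]
  | some b =>
    obtain ⟨hb0, hblt, hbne⟩ := hbi b rfl
    obtain ⟨q, hq⟩ : ∃ q, pages.getD b.toNat none = some q := by
      cases hp : pages.getD b.toNat none
      · exact absurd hp hbne
      · exact ⟨_, rfl⟩
    have hbrow : b.toNat < rows.length := by omega
    have hrb : rows[b.toNat].length = i := hrowlen _ (List.getElem_mem hbrow)
    have hgd : (rows.mapIdx fun f row => row ++ [reprs.getD f ""]).getD b.toNat []
        = rows[b.toNat] ++ [reprs.getD b.toNat ""] := by
      rw [List.getD_eq_getElem _ _ (by simpa using hbrow), List.getElem_mapIdx]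
    apply List.ext_getElem?
    intro j
    rw [List.getElem?_set, List.getElem?_mapIdx, List.getElem?_mapIdx]
    split_ifs with hbj hblt2
    · subst hbj
      rw [List.getElem?_eq_getElem hbrow, Option.map_some, hgd]
      have hL : (rows[b.toNat] ++ [reprs.getD b.toNat ""]).length - 1 = rows[b.toNat].length := by
        simp
      rw [hL, List.set_append]
      simp only [lt_irrefl, if_false, Nat.sub_self, List.set_cons_zero]
      rw [hreprs _ hblt, hq]
      have hbc : ((b.toNat : Nat) : Int) = b := by omega
      simp [pvCell0, pvCell, hbc]
    · exact absurd (by simpa using hbrow) hblt2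
    · cases hje : rows[j]? with
      | none => simp
      | some r =>
        have hjlt : j < pages.length := by
          obtain ⟨h, -⟩ := List.getElem?_eq_some_iff.1 hje
          omega
        rw [Option.map_some, Option.map_some, hreprs j hjlt]
        have hfb : ¬ (some b = some ((j : Nat) : Int)) := by
          intro h
          apply hbj
          have : b = ((j : Nat) : Int) := by simpa using h
          omega
        cases hp : pages.getD j none <;> simp [pvCell0, pvCell, hfb]

-- main loop invariant: A's loop from column i is the mid fold through the abstraction
lemma pv_loop_eq (nm : Int) (hnm : 1 ≤ nm) :
    ∀ (rest : List Int) (i N : Nat) (pages : List (Option Int)) (bi : Option Int) (ptr : Int)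
      (reprs : List String) (rows : List (List String)) (fault : List String) (tot : Int),
    pages.length = nm.toNat → rows.length = nm.toNat →
    (∀ r ∈ rows, r.length = i) → fault.length = i → N = i + rest.length →
    0 ≤ ptr → ptr < nm →
    reprs.length = nm.toNat →
    (∀ f, f < pages.length → reprs.getD f "" = pvCell0 (pages.getD f none)) →
    (∀ j : Int, bi = some j → 0 ≤ j ∧ j < nm ∧ pages.getD j.toNat none ≠ none) →
    pvLoopA nm rest i
      (pvZ pages bi, ptr,
       rows.map (· ++ List.replicate rest.length "") ++ [List.replicate N ""],
       fault ++ List.replicate rest.length "", tot)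
    = pvAbs N (rest.foldl (pvStepMid nm) (pages, bi, ptr, reprs, rows, fault, tot)) := by
  intro rest
  induction rest with
  | nil =>
    intro i N pages bi ptr reprs rows fault tot hlen hrlen hrowlen hflen hN h0 h1 hrplen hreprs hbi
    simp [pvLoopA, pvAbs]
  | cons page rest ih =>
    intro i N pages bi ptr reprs rows fault tot hlen hrlen hrowlen hflen hN h0 h1 hrplen hreprs hbi
    have hm0 : (0 : Int) < nm := by omega
    have h21 : (nm + 1).toNat = nm.toNat + 1 := by omega
    have hNn : N = i + (rest.length + 1) := by simpa using hN
    rw [pvLoopA, List.foldl_cons]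
    simp only [pvStepA, pvStepMid, pvZ_map_fst, List.length_cons, h21]
    by_cases hmem : (some page) ∈ pages
    · -- HIT
      obtain ⟨idx, hidx⟩ := Option.isSome_iff_exists.1
        ((PySem.List.index?_isSome_iff pages (some page)).2 hmem)
      obtain ⟨hidxlt, hidxval, -⟩ := PySem.List.getElem_of_index?_eq_some hidx
      rw [if_pos hmem, if_pos hmem, hidx]
      simp only [Option.getD_some, pvZ_map_clear]
      rw [pvZ_getD pages none idx hidxlt]
      simp only []
      rw [pvZ_set_true pages idx hidxlt]
      have hfal : (fault ++ List.replicate (rest.length + 1) "").set i ""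
          = (fault ++ [""]) ++ List.replicate rest.length "" := by
        rw [← hflen, pv_set_pad]
      rw [hfal, pv_stepA_matrix nm.toNat i rest.length N rows _ hrlen hrowlen hNn]
      have hcells : (rows.mapIdx fun f r => r ++ [pvVolcarVal (pvZ pages (some (idx : Int))) f])
          = rows.mapIdx fun f r => r ++ [pvCell (pages.getD f none) f (some (idx : Int))] := by
        apply pv_mapIdx_congr
        intro j hj
        rw [pv_volcarVal_cell pages _ j (by omega)]
      have hbiH : ∀ b : Int, (some (idx : Int) : Option Int) = some b →
          0 ≤ b ∧ b.toNat < pages.length ∧ pages.getD b.toNat none ≠ none := by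
        intro b hb
        obtain rfl : (idx : Int) = b := by simpa using hb
        refine ⟨by omega, by simpa using hidxlt, ?_⟩
        rw [Int.toNat_natCast, List.getD_eq_getElem _ _ hidxlt, hidxval]
        simp
      have hemit : pvEmit reprs (some (idx : Int)) rows
          = rows.mapIdx fun f r => r ++ [pvCell (pages.getD f none) f (some (idx : Int))] :=
        pv_emit_eq pages reprs rows i _ (by omega) (by omega) hrowlen hreprs hbiH
      rw [hcells, hemit]
      exact ih (i + 1) N pages (some (idx : Int)) ptr reprs
        (rows.mapIdx fun f r => r ++ [pvCell (pages.getD f none) f (some (idx : Int))])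
        (fault ++ [""]) tot hlen
        (by rw [List.length_mapIdx, hrlen])
        (by intro r hr
            obtain ⟨j, hj, rfl⟩ := List.mem_mapIdx.1 hr
            simp [hrowlen _ (List.getElem_mem hj)])
        (by simp only [List.length_append, List.length_cons, List.length_nil, hflen])
        (by omega) h0 h1 hrplen hreprs
        (by intro j hj
            obtain ⟨hb0, hb1, hb2⟩ := hbiH j hj
            exact ⟨hb0, by omega, hb2⟩)
    · -- MISS
      rw [if_neg hmem, if_neg hmem]
      have hrange : nm.toNat = (pvZ pages bi).length := by rw [pvZ_length, hlen]
      rw [hrange, pv_find_range, pvZ_map_fst, ← hrange]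
      by_cases hfree : (none : Option Int) ∈ pages
      · -- page fault, a free frame exists
        obtain ⟨f, hf⟩ := Option.isSome_iff_exists.1
          ((PySem.List.index?_isSome_iff pages none).2 hfree)
        obtain ⟨hflt, hfval, -⟩ := PySem.List.getElem_of_index?_eq_some hf
        rw [if_pos hfree]
        simp only [hf, Option.getD_some]
        have hbif : bi ≠ some ((f : Nat) : Int) := by
          intro h
          have := (hbi _ h).2.2
          rw [Int.toNat_natCast, List.getD_eq_getElem _ _ hflt, hfval] at this
          exact this rfl
        rw [pvZ_set_false pages bi f (some page) hbif]
        have hfal : (fault ++ List.replicate (rest.length + 1) "").set i "*"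
            = (fault ++ ["*"]) ++ List.replicate rest.length "" := by
          rw [← hflen, pv_set_pad]
        rw [hfal, pv_stepA_matrix nm.toNat i rest.length N rows _ hrlen hrowlen hNn]
        have hcells : (rows.mapIdx fun f' r =>
              r ++ [pvVolcarVal (pvZ (pages.set f (some page)) bi) f'])
            = rows.mapIdx fun f' r =>
              r ++ [pvCell ((pages.set f (some page)).getD f' none) f' bi] := by
          apply pv_mapIdx_congr
          intro j hj
          rw [pv_volcarVal_cell _ _ j (by simp; omega)]
        have hbiF : ∀ j : Int, bi = some j →
            0 ≤ j ∧ j < nm ∧ (pages.set f (some page)).getD j.toNat none ≠ none := by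
          intro j hj
          obtain ⟨hj0, hj1, hjv⟩ := hbi j hj
          refine ⟨hj0, hj1, ?_⟩
          have hne : f ≠ j.toNat := by
            intro h
            subst h
            rw [List.getD_eq_getElem _ _ hflt, hfval] at hjv
            exact hjv rfl
          rw [List.getD_eq_getElem?_getD, List.getElem?_set_ne hne,
            ← List.getD_eq_getElem?_getD]
          exact hjv
        have hreprsF : ∀ f', f' < (pages.set f (some page)).length →
            (reprs.set f (PySem.Int.toStr page)).getD f' ""
              = pvCell0 ((pages.set f (some page)).getD f' none) := by
          intro f' hf'
          by_cases hff : f = f'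
          · subst hff
            have hfr : f < reprs.length := by omega
            simp [List.getD_eq_getElem?_getD, hfr, hflt, pvCell0]
          · rw [List.getD_eq_getElem?_getD, List.getElem?_set_ne hff,
              List.getD_eq_getElem?_getD, List.getElem?_set_ne hff,
              ← List.getD_eq_getElem?_getD, ← List.getD_eq_getElem?_getD]
            exact hreprs f' (by simpa using hf')
        have hemit : pvEmit (reprs.set f (PySem.Int.toStr page)) bi rows
            = rows.mapIdx fun f' r =>
              r ++ [pvCell ((pages.set f (some page)).getD f' none) f' bi] :=
          pv_emit_eq _ _ rows i bi (by simp; omega) (by simp; omega) hrowlen hreprsF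
            (by intro b hb
                obtain ⟨hb0, hb1, hb2⟩ := hbiF b hb
                exact ⟨hb0, by simp; omega, hb2⟩)
        rw [hcells, hemit]
        exact ih (i + 1) N (pages.set f (some page)) bi ptr (reprs.set f (PySem.Int.toStr page))
          (rows.mapIdx fun f' r => r ++ [pvCell ((pages.set f (some page)).getD f' none) f' bi])
          (fault ++ ["*"]) (tot + 1)
          (by simp [hlen])
          (by rw [List.length_mapIdx, hrlen])
          (by intro r hr
              obtain ⟨j, hj, rfl⟩ := List.mem_mapIdx.1 hr
              simp [hrowlen _ (List.getElem_mem hj)])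
          (by simp only [List.length_append, List.length_cons, List.length_nil, hflen])
          (by omega) h0 h1 (by simp [hrplen]) hreprsF hbiF
      · -- page fault, no free frame: second chance
        rw [(PySem.List.index?_eq_none_iff pages none).2 hfree, if_neg hfree]
        have hpt : ptr.toNat < pages.length := by omega
        have hptc : ((ptr.toNat : Nat) : Int) = ptr := by omega
        have hmodpos : ∀ a : Int, 0 ≤ PySem.Int.mod a nm := fun a => PySem.Int.mod_nonneg a hm0
        have hmodlt : ∀ a : Int, PySem.Int.mod a nm < nm := fun a => PySem.Int.mod_lt a hm0
        by_cases hbp : bi = some ptr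
        · -- the pointed frame carries the bit: clear it, advance, replace next frame
          rw [if_pos hbp]
          have hmt1 : (PySem.Int.mod (ptr + 1) nm).toNat < pages.length := by
            have := hmodpos (ptr + 1); have := hmodlt (ptr + 1); omega
          have hsc : pvSCLoop page nm (pvZ pages bi) ptr
              = (pvZ (pages.set (PySem.Int.mod (ptr + 1) nm).toNat (some page)) none,
                 PySem.Int.mod (PySem.Int.mod (ptr + 1) nm + 1) nm) := by
            rw [pvSCLoop]
            rw [dif_pos (by rw [pvZ_getD pages bi ptr.toNat hpt, hptc, hbp]; simp)]
            rw [pvZ_getD pages bi ptr.toNat hpt]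
            rw [hbp]
            rw [show (some ptr : Option Int) = some ((ptr.toNat : Nat) : Int) from by rw [hptc]]
            rw [pvZ_set_clearAt pages ptr.toNat hpt]
            rw [pvSCLoop]
            rw [dif_neg (by rw [pvZ_getD pages none _ hmt1]; simp)]
            rw [pvZ_set_false pages none _ (some page) (by simp)]
          rw [hsc]
          have hfal : (fault ++ List.replicate (rest.length + 1) "").set i "*"
              = (fault ++ ["*"]) ++ List.replicate rest.length "" := by
            rw [← hflen, pv_set_pad]
          rw [hfal, pv_stepA_matrix nm.toNat i rest.length N rows _ hrlen hrowlen hNn]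
          have hcells : (rows.mapIdx fun f' r =>
                r ++ [pvVolcarVal (pvZ (pages.set (PySem.Int.mod (ptr + 1) nm).toNat (some page)) none) f'])
              = rows.mapIdx fun f' r =>
                r ++ [pvCell ((pages.set (PySem.Int.mod (ptr + 1) nm).toNat (some page)).getD f' none) f' none] := by
            apply pv_mapIdx_congr
            intro j hj
            rw [pv_volcarVal_cell _ _ j (by simp; omega)]
          have hreprsP : ∀ f', f' < (pages.set (PySem.Int.mod (ptr + 1) nm).toNat (some page)).length →
              (reprs.set (PySem.Int.mod (ptr + 1) nm).toNat (PySem.Int.toStr page)).getD f' ""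
                = pvCell0 ((pages.set (PySem.Int.mod (ptr + 1) nm).toNat (some page)).getD f' none) := by
            intro f' hf'
            by_cases hff : (PySem.Int.mod (ptr + 1) nm).toNat = f'
            · subst hff
              have hfr : (PySem.Int.mod (ptr + 1) nm).toNat < reprs.length := by omega
              simp [List.getD_eq_getElem?_getD, hfr, hmt1, pvCell0]
            · rw [List.getD_eq_getElem?_getD, List.getElem?_set_ne hff,
                List.getD_eq_getElem?_getD, List.getElem?_set_ne hff,
                ← List.getD_eq_getElem?_getD, ← List.getD_eq_getElem?_getD]
              exact hreprs f' (by simpa using hf')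
          have hemit : pvEmit (reprs.set (PySem.Int.mod (ptr + 1) nm).toNat (PySem.Int.toStr page))
                (none : Option Int) rows
              = rows.mapIdx fun f' r =>
                r ++ [pvCell ((pages.set (PySem.Int.mod (ptr + 1) nm).toNat (some page)).getD f' none) f' none] :=
            pv_emit_eq _ _ rows i none (by simp; omega) (by simp; omega) hrowlen hreprsP
              (by intro b hb; simp at hb)
          rw [hcells, hemit]
          exact ih (i + 1) N (pages.set (PySem.Int.mod (ptr + 1) nm).toNat (some page)) none
            (PySem.Int.mod (PySem.Int.mod (ptr + 1) nm + 1) nm)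
            (reprs.set (PySem.Int.mod (ptr + 1) nm).toNat (PySem.Int.toStr page))
            (rows.mapIdx fun f' r =>
              r ++ [pvCell ((pages.set (PySem.Int.mod (ptr + 1) nm).toNat (some page)).getD f' none) f' none])
            (fault ++ ["*"]) (tot + 1)
            (by simp [hlen])
            (by rw [List.length_mapIdx, hrlen])
            (by intro r hr
                obtain ⟨j, hj, rfl⟩ := List.mem_mapIdx.1 hr
                simp [hrowlen _ (List.getElem_mem hj)])
            (by simp only [List.length_append, List.length_cons, List.length_nil, hflen])
            (by omega) (hmodpos _) (hmodlt _) (by simp [hrplen]) hreprsP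
            (by intro j hj; simp at hj)
        · -- the pointed frame has no bit: replace it directly
          rw [if_neg hbp]
          have hsc : pvSCLoop page nm (pvZ pages bi) ptr
              = (pvZ (pages.set ptr.toNat (some page)) bi, PySem.Int.mod (ptr + 1) nm) := by
            rw [pvSCLoop]
            rw [dif_neg (by rw [pvZ_getD pages bi ptr.toNat hpt, hptc]; simp [hbp])]
            rw [pvZ_set_false pages bi ptr.toNat (some page) (by rw [hptc]; exact hbp)]
          rw [hsc]
          have hfal : (fault ++ List.replicate (rest.length + 1) "").set i "*"
              = (fault ++ ["*"]) ++ List.replicate rest.length "" := by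
            rw [← hflen, pv_set_pad]
          rw [hfal, pv_stepA_matrix nm.toNat i rest.length N rows _ hrlen hrowlen hNn]
          have hcells : (rows.mapIdx fun f' r =>
                r ++ [pvVolcarVal (pvZ (pages.set ptr.toNat (some page)) bi) f'])
              = rows.mapIdx fun f' r =>
                r ++ [pvCell ((pages.set ptr.toNat (some page)).getD f' none) f' bi] := by
            apply pv_mapIdx_congr
            intro j hj
            rw [pv_volcarVal_cell _ _ j (by simp; omega)]
          have hbiN : ∀ j : Int, bi = some j →
              0 ≤ j ∧ j < nm ∧ (pages.set ptr.toNat (some page)).getD j.toNat none ≠ none := by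
            intro j hj
            obtain ⟨hj0, hj1, hjv⟩ := hbi j hj
            refine ⟨hj0, hj1, ?_⟩
            have hne : ptr.toNat ≠ j.toNat := by
              intro h
              apply hbp
              rw [hj]
              congr 1
              omega
            rw [List.getD_eq_getElem?_getD, List.getElem?_set_ne hne,
              ← List.getD_eq_getElem?_getD]
            exact hjv
          have hreprsN : ∀ f', f' < (pages.set ptr.toNat (some page)).length →
              (reprs.set ptr.toNat (PySem.Int.toStr page)).getD f' ""
                = pvCell0 ((pages.set ptr.toNat (some page)).getD f' none) := by
            intro f' hf'
            by_cases hff : ptr.toNat = f'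
            · subst hff
              have hfr : ptr.toNat < reprs.length := by omega
              simp [List.getD_eq_getElem?_getD, hfr, hpt, pvCell0]
            · rw [List.getD_eq_getElem?_getD, List.getElem?_set_ne hff,
                List.getD_eq_getElem?_getD, List.getElem?_set_ne hff,
                ← List.getD_eq_getElem?_getD, ← List.getD_eq_getElem?_getD]
              exact hreprs f' (by simpa using hf')
          have hemit : pvEmit (reprs.set ptr.toNat (PySem.Int.toStr page)) bi rows
              = rows.mapIdx fun f' r =>
                r ++ [pvCell ((pages.set ptr.toNat (some page)).getD f' none) f' bi] :=
            pv_emit_eq _ _ rows i bi (by simp; omega) (by simp; omega) hrowlen hreprsN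
              (by intro b hb
                  obtain ⟨hb0, hb1, hb2⟩ := hbiN b hb
                  exact ⟨hb0, by simp; omega, hb2⟩)
          rw [hcells, hemit]
          exact ih (i + 1) N (pages.set ptr.toNat (some page)) bi (PySem.Int.mod (ptr + 1) nm)
            (reprs.set ptr.toNat (PySem.Int.toStr page))
            (rows.mapIdx fun f' r =>
              r ++ [pvCell ((pages.set ptr.toNat (some page)).getD f' none) f' bi])
            (fault ++ ["*"]) (tot + 1)
            (by simp [hlen])
            (by rw [List.length_mapIdx, hrlen])
            (by intro r hr
                obtain ⟨j, hj, rfl⟩ := List.mem_mapIdx.1 hr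
                simp [hrowlen _ (List.getElem_mem hj)])
            (by simp only [List.length_append, List.length_cons, List.length_nil, hflen])
            (by omega) (hmodpos _) (hmodlt _) (by simp [hrplen]) hreprsN hbiN

-- A equals the intermediate program on every admitted input with at least one frame
lemma pv_A_eq_mid (referencia : List Int) (num_marcos : Int) (hm : 1 ≤ num_marcos) :
    fifo_mejorado referencia num_marcos = pvMid referencia num_marcos := by
  have h1 : List.replicate num_marcos.toNat ((none : Option Int), false)
      = pvZ (List.replicate num_marcos.toNat none) none := (pvZ_replicate _).symm
  have hmat : List.replicate (num_marcos + 1).toNat (List.replicate referencia.length "")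
      = List.replicate num_marcos.toNat (List.replicate referencia.length "")
        ++ [List.replicate referencia.length ""] := by
    have h2 : (num_marcos + 1).toNat = num_marcos.toNat + 1 := by omega
    rw [h2, List.replicate_succ']
  have hloop := pv_loop_eq num_marcos hm referencia 0 referencia.length
    (List.replicate num_marcos.toNat none) none 0 (List.replicate num_marcos.toNat "")
    (List.replicate num_marcos.toNat []) [] 0
    (by simp) (by simp) (by simp) rfl (by simp) le_rfl (by omega) (by simp)
    (by intro f hf
        have hf' : f < num_marcos.toNat := by simpa using hf
        rw [List.getD_replicate _ hf', List.getD_replicate _ hf']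
        rfl)
    (by simp)
  simp only [List.nil_append, List.map_replicate] at hloop
  have hrl := pv_foldMid_rows_len num_marcos referencia
    (List.replicate num_marcos.toNat none, none, 0, List.replicate num_marcos.toNat "",
     List.replicate num_marcos.toNat [], [], 0)
  obtain ⟨⟨P, B, PT, RP, R, F, T⟩, hfold⟩ :
      ∃ st, referencia.foldl (pvStepMid num_marcos)
        (List.replicate num_marcos.toNat none, none, 0, List.replicate num_marcos.toNat "",
         List.replicate num_marcos.toNat [], [], 0) = st := ⟨_, rfl⟩
  rw [hfold] at hloop hrl
  rw [fifo_mejorado, pvMid, h1, hmat, hloop, hfold]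
  simp only [pvAbs]
  show ((R ++ [List.replicate referencia.length ""]).set num_marcos.toNat F, T) = (R ++ [F], T)
  have hRlen : R.length = num_marcos.toNat := by simpa using hrl
  rw [← hRlen, List.set_append]
  simp

-- ---- mid ↔ B: the simulation invariant relating the mid state to B's dict/queue state ----

def pvInv (nm : Int)
    (M : List (Option Int) × Option Int × Int × List String × List (List String) × List String × Int)
    (S : PySem.Dict Int Int × PySem.Dict Int Int × List Int × Int × Option Int ×
         List (List String) × List String × Int) : Prop :=
  match M, S with
  | (pages, bi, ptr, reprs, rows, fault, tot), (loc, slot, queue, nf, star, cols, fault', tot') =>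
    fault' = fault ∧ tot' = tot ∧ star = bi ∧
    pages.length = nm.toNat ∧
    (∀ f : Nat, f < nm.toNat → PySem.Dict.get? slot ((f : Nat) : Int) = pages.getD f none) ∧
    (∀ p : Int, PySem.Dict.get? loc p
        = (PySem.List.index? pages (some p)).map (fun k => ((k : Nat) : Int))) ∧
    0 ≤ nf ∧ nf ≤ nm ∧
    (∀ j : Nat, j < nm.toNat → (pages.getD j none = none ↔ nf ≤ (j : Int))) ∧
    0 ≤ ptr ∧ ptr < nm ∧
    (nf = nm → queue = PySem.List.pyRange ptr nm 1 ++ PySem.List.pyRange 0 ptr 1) ∧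
    (nf < nm → ptr = 0 ∧ queue = PySem.List.pyRange 0 nm 1) ∧
    reprs.length = nm.toNat ∧
    (∀ f : Nat, f < nm.toNat → reprs.getD f "" = pvCell0 (pages.getD f none)) ∧
    rows.length = nm.toNat ∧
    (∀ f : Nat, f < nm.toNat →
        rows.getD f [] = cols.map (fun c => (PySem.List.pyGet? c ((f : Nat) : Int)).getD "")) ∧
    (∀ j : Int, bi = some j → 0 ≤ j ∧ j < nm ∧ pages.getD j.toNat none ≠ none) ∧
    (∀ i j : Nat, i < nm.toNat → j < nm.toNat → pages.getD i none ≠ none →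
        pages.getD i none = pages.getD j none → i = j)

-- ---- small dict / index? / rotation facts used by the simulation proof ----

lemma pv_get?_erase_self (d : PySem.Dict Int Int) (k : Int) :
    (d.erase k).get? k = none := by
  simp only [PySem.Dict.erase, PySem.Dict.get?]
  rw [List.find?_filter]
  have h : ∀ p : Int × Int, ((!p.1 == k) && (p.1 == k)) = false := by
    intro p; by_cases h : p.1 = k <;> simp [h]
  simp [h]

lemma pv_get?_erase_of_ne (d : PySem.Dict Int Int) (k k' : Int) (h : k' ≠ k) :
    (d.erase k).get? k' = d.get? k' := by
  have h' : k ≠ k' := Ne.symm h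
  simp only [PySem.Dict.erase, PySem.Dict.get?]
  congr 1
  induction d.items with
  | nil => rfl
  | cons p t ih =>
    by_cases hp : p.1 = k
    · have h2 : ¬ (p.1 = k') := by omega
      simp [hp, h2, h', ih]
    · by_cases hq : p.1 = k'
      · simp [hp, hq, h]
      · simp [hp, hq, ih]

lemma pv_index?_first (xs : List (Option Int)) (v : Option Int) (k : Nat) (hk : k < xs.length)
    (hv : xs[k] = v) (hprev : ∀ j (hj : j < k), xs[j] ≠ v) :
    PySem.List.index? xs v = some k := by
  induction xs generalizing k with
  | nil => simp at hk
  | cons a t ih =>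
    cases k with
    | zero =>
      simp at hv; subst hv
      exact PySem.List.index?_cons_self _ _
    | succ k =>
      have ha : a ≠ v := by have := hprev 0 (by omega); simpa using this
      rw [PySem.List.index?_cons_of_ne _ ha, ih k (by simpa using hk) (by simpa using hv)
        (fun j hj => by have := hprev (j+1) (by omega); simpa using this)]
      rfl

lemma pv_index?_set_fresh (xs : List (Option Int)) (k : Nat) (hk : k < xs.length)
    (v : Option Int) (hv : v ∉ xs) : PySem.List.index? (xs.set k v) v = some k := by
  apply pv_index?_first _ _ _ (by simpa using hk)
  · simp [List.getElem_set]
  · intro j hj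
    have hjlen : j < xs.length := by omega
    rw [List.getElem_set]
    intro hc
    split_ifs at hc with he
    · omega
    · exact hv (hc ▸ List.getElem_mem hjlen)

lemma pv_index?_set_ne (xs : List (Option Int)) (k : Nat) (a b : Option Int)
    (hold : ∀ (hk : k < xs.length), xs[k] ≠ b) (hnew : a ≠ b) :
    PySem.List.index? (xs.set k a) b = PySem.List.index? xs b := by
  induction xs generalizing k with
  | nil => simp
  | cons x t ih =>
    cases k with
    | zero =>
      have hx : x ≠ b := by have := hold (by simp); simpa using this
      rw [List.set_cons_zero, PySem.List.index?_cons_of_ne _ hnew,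
        PySem.List.index?_cons_of_ne _ hx]
    | succ k =>
      by_cases hx : x = b
      · subst hx
        rw [List.set_cons_succ, PySem.List.index?_cons_self, PySem.List.index?_cons_self]
      · rw [List.set_cons_succ, PySem.List.index?_cons_of_ne _ hx,
          PySem.List.index?_cons_of_ne _ hx,
          ih k (fun hk => by have := hold (by simpa using Nat.succ_lt_succ hk); simpa using this)]

lemma pv_index?_set_out (xs : List (Option Int)) (k : Nat) (a b : Option Int)
    (honly : ∀ j (hj : j < xs.length), xs[j] = b → j = k) (hnew : a ≠ b) :
    PySem.List.index? (xs.set k a) b = none := by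
  rw [PySem.List.index?_eq_none_iff]
  intro hmem
  obtain ⟨j, hj, hv⟩ := List.mem_iff_getElem.1 hmem
  rw [List.getElem_set] at hv
  split_ifs at hv with he
  · exact hnew hv
  · exact he ((honly j (by simpa using hj) hv).symm)

-- popping the head of the frame rotation and requeueing it advances the rotation
lemma pv_rot_step (nm ptr : Int) (h0 : 0 ≤ ptr) (h1 : ptr < nm) :
    PySem.List.pyRange ptr nm 1 ++ PySem.List.pyRange 0 ptr 1
      = ptr :: (PySem.List.pyRange (ptr + 1) nm 1 ++ PySem.List.pyRange 0 ptr 1) ∧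
    (PySem.List.pyRange (ptr + 1) nm 1 ++ PySem.List.pyRange 0 ptr 1) ++ [ptr]
      = PySem.List.pyRange (PySem.Int.mod (ptr + 1) nm) nm 1
        ++ PySem.List.pyRange 0 (PySem.Int.mod (ptr + 1) nm) 1 := by
  constructor
  · rw [PySem.List.pyRange_one_cons h1]
    rfl
  · by_cases h2 : ptr + 1 < nm
    · have hmod : PySem.Int.mod (ptr + 1) nm = ptr + 1 := by
        rw [PySem.Int.mod_eq_emod_of_pos (by omega)]
        exact Int.emod_eq_of_lt (by omega) h2
      rw [hmod, List.append_assoc, ← PySem.List.pyRange_one_succ_right h0]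
    · have hptr : ptr + 1 = nm := by omega
      have hmod : PySem.Int.mod (ptr + 1) nm = 0 := by
        rw [hptr, PySem.Int.mod_eq_emod_of_pos (by omega), Int.emod_self]
      have hempty : PySem.List.pyRange (ptr + 1) nm 1 = [] := by
        rw [hptr]
        simp [PySem.List.pyRange]
      rw [hmod, hempty, List.nil_append, ← PySem.List.pyRange_one_succ_right h0, hptr]
      simp [PySem.List.pyRange]

-- reading cell f of a freshly rendered column
lemma pv_pyGet_col (nm : Int) (g : Int → String) (f : Nat) (hf : (f : Int) < nm) :
    (PySem.List.pyGet? ((PySem.List.pyRange 0 nm 1).map g) ((f : Nat) : Int)).getD "" = g f := by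
  have hnm : nm = ((nm.toNat : Nat) : Int) := by omega
  rw [hnm, PySem.List.pyGet?_natCast,
    PySem.List.getElem?_map_pyRange_zero g nm.toNat f (by omega)]
  rfl

-- B's rendered cell is the mid formatted cell
lemma pv_render_eq_cell (nm : Int) (slot : PySem.Dict Int Int) (pages : List (Option Int))
    (h5 : ∀ f : Nat, f < nm.toNat → PySem.Dict.get? slot ((f : Nat) : Int) = pages.getD f none)
    (f : Nat) (hf : f < nm.toNat) (star : Option Int) :
    pvRender slot ((f : Nat) : Int) star = pvCell (pages.getD f none) f star := by
  rw [pvRender, h5 f hf]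
  cases pages.getD f none <;> rfl


-- after writing page into frame v, the slot dict still mirrors the page list
lemma pv_slot_set (nm : Int) (slot : PySem.Dict Int Int) (pages : List (Option Int)) (v : Int)
    (h4 : pages.length = nm.toNat) (hv0 : 0 ≤ v) (hv1 : v < nm) (page : Int)
    (h5 : ∀ f : Nat, f < nm.toNat → PySem.Dict.get? slot ((f : Nat) : Int) = pages.getD f none) :
    ∀ f : Nat, f < nm.toNat → PySem.Dict.get? (PySem.Dict.insert slot v page) ((f : Nat) : Int)
      = (pages.set v.toNat (some page)).getD f none := by
  intro f hf
  rw [PySem.Dict.get?_insert]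
  by_cases hff : ((f : Nat) : Int) = v
  · have hfv : f = v.toNat := by omega
    subst hfv
    rw [if_pos hff, List.getD_eq_getElem _ _ (by simp; omega), List.getElem_set]
    simp
  · have hfv : v.toNat ≠ f := by omega
    rw [if_neg hff, h5 f hf,
      show (pages.set v.toNat (some page)).getD f none = pages.getD f none from by
        rw [List.getD_eq_getElem?_getD (l := pages.set v.toNat (some page)),
          List.getElem?_set_ne hfv, ← List.getD_eq_getElem?_getD]]

-- after writing page into frame v, the cached cell strings still mirror the page list
lemma pv_reprs_set (nm : Int) (reprs : List String) (pages : List (Option Int)) (v : Int)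
    (page : Int) (h4 : pages.length = nm.toNat) (h15 : reprs.length = nm.toNat)
    (hv0 : 0 ≤ v) (hv1 : v < nm)
    (h14 : ∀ f : Nat, f < nm.toNat → reprs.getD f "" = pvCell0 (pages.getD f none)) :
    ∀ f : Nat, f < nm.toNat → (reprs.set v.toNat (PySem.Int.toStr page)).getD f ""
      = pvCell0 ((pages.set v.toNat (some page)).getD f none) := by
  intro f hf
  by_cases hff : v.toNat = f
  · subst hff
    rw [List.getD_eq_getElem _ _ (by simp [h15]; omega), List.getElem_set, if_pos rfl,
      List.getD_eq_getElem _ _ (by simp; omega), List.getElem_set, if_pos rfl]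
    rfl
  · rw [List.getD_eq_getElem?_getD, List.getElem?_set_ne hff,
      List.getD_eq_getElem?_getD (l := pages.set v.toNat (some page)),
      List.getElem?_set_ne hff,
      ← List.getD_eq_getElem?_getD, ← List.getD_eq_getElem?_getD]
    exact h14 f hf

-- writing an absent page into a frame keeps the occupied pages pairwise distinct
lemma pv_distinct_set (nm : Int) (pages : List (Option Int)) (v : Int) (page : Int)
    (h4 : pages.length = nm.toNat) (hv0 : 0 ≤ v) (hv1 : v < nm)
    (hmem : (some page) ∉ pages)
    (h19 : ∀ i j : Nat, i < nm.toNat → j < nm.toNat → pages.getD i none ≠ none →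
        pages.getD i none = pages.getD j none → i = j) :
    ∀ i j : Nat, i < nm.toNat → j < nm.toNat →
      (pages.set v.toNat (some page)).getD i none ≠ none →
      (pages.set v.toNat (some page)).getD i none = (pages.set v.toNat (some page)).getD j none →
      i = j := by
  intro i j hi hj hne heq
  have hmem' : ∀ k : Nat, k < nm.toNat → k ≠ v.toNat → pages.getD k none ≠ some page := by
    intro k hk hkv hc
    apply hmem
    rw [List.getD_eq_getElem _ _ (by omega)] at hc
    exact hc ▸ List.getElem_mem _
  have hgi : ∀ k : Nat, k < nm.toNat → k ≠ v.toNat →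
      (pages.set v.toNat (some page)).getD k none = pages.getD k none := by
    intro k hk hkv
    rw [List.getD_eq_getElem?_getD, List.getElem?_set_ne (Ne.symm hkv),
      ← List.getD_eq_getElem?_getD]
  have hgv : (pages.set v.toNat (some page)).getD v.toNat none = some page := by
    rw [List.getD_eq_getElem _ _ (by simp; omega), List.getElem_set, if_pos rfl]
  by_cases hiv : i = v.toNat
  · by_cases hjv : j = v.toNat
    · omega
    · subst hiv
      rw [hgv, hgi j hj hjv] at heq
      exact absurd heq.symm (hmem' j hj hjv)
  · by_cases hjv : j = v.toNat
    · subst hjv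
      rw [hgi i hi hiv, hgv] at heq
      exact absurd heq (hmem' i hi hiv)
    · rw [hgi i hi hiv] at hne heq
      rw [hgi j hj hjv] at heq
      exact h19 i j hi hj hne heq

-- filling a free frame keeps the residency dict the index of each page
lemma pv_loc_fill (nm : Int) (loc : PySem.Dict Int Int) (pages : List (Option Int)) (v : Int)
    (page : Int) (h4 : pages.length = nm.toNat) (hv0 : 0 ≤ v) (hv1 : v < nm)
    (hmem : (some page) ∉ pages) (hfreev : pages.getD v.toNat none = none)
    (h6 : ∀ p : Int, PySem.Dict.get? loc p
        = (PySem.List.index? pages (some p)).map (fun k => ((k : Nat) : Int))) :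
    ∀ p : Int, PySem.Dict.get? (PySem.Dict.insert loc page v) p
      = (PySem.List.index? (pages.set v.toNat (some page)) (some p)).map
          (fun k => ((k : Nat) : Int)) := by
  intro p
  by_cases hp : p = page
  · subst hp
    rw [PySem.Dict.get?_insert_self,
      pv_index?_set_fresh pages v.toNat (by omega) (some p) hmem]
    simp only [Option.map_some]
    congr 1
    omega
  · rw [PySem.Dict.get?_insert_of_ne _ _ hp, h6 p,
      pv_index?_set_ne pages v.toNat (some page) (some p)
        (fun hk => by
          rw [← List.getD_eq_getElem _ _ hk, hfreev]
          simp)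
        (fun hc => hp (by injection hc with h; exact h.symm))]

-- evicting the page of frame v and installing a new one: the residency dict again indexes
lemma pv_loc_evict (nm : Int) (loc : PySem.Dict Int Int) (pages : List (Option Int)) (v : Int)
    (page q : Int) (h4 : pages.length = nm.toNat) (hv0 : 0 ≤ v) (hv1 : v < nm)
    (hmem : (some page) ∉ pages) (hqv : pages.getD v.toNat none = some q)
    (h6 : ∀ p : Int, PySem.Dict.get? loc p
        = (PySem.List.index? pages (some p)).map (fun k => ((k : Nat) : Int)))
    (h19 : ∀ i j : Nat, i < nm.toNat → j < nm.toNat → pages.getD i none ≠ none →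
        pages.getD i none = pages.getD j none → i = j) :
    ∀ p : Int, PySem.Dict.get? (PySem.Dict.insert (PySem.Dict.erase loc q) page v) p
      = (PySem.List.index? (pages.set v.toNat (some page)) (some p)).map
          (fun k => ((k : Nat) : Int)) := by
  have hqElem : pages[v.toNat]'(by omega) = some q := by
    rw [← List.getD_eq_getElem _ _ (by omega)]
    exact hqv
  have hqmem : (some q) ∈ pages := hqElem ▸ List.getElem_mem _
  have hqne : q ≠ page := fun hc => hmem (hc ▸ hqmem)
  intro p
  by_cases hp : p = page
  · subst hp
    rw [PySem.Dict.get?_insert_self,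
      pv_index?_set_fresh pages v.toNat (by omega) (some p) hmem]
    simp only [Option.map_some]
    congr 1
    omega
  · rw [PySem.Dict.get?_insert_of_ne _ _ hp]
    by_cases hpq : p = q
    · subst hpq
      rw [pv_get?_erase_self,
        pv_index?_set_out pages v.toNat (some page) (some p)
          (fun j hj hjv => by
            apply h19 j v.toNat (by omega) (by omega)
            · rw [List.getD_eq_getElem _ _ hj, hjv]
              simp
            · rw [List.getD_eq_getElem _ _ hj, hjv, hqv])
          (fun hc => hqne (by injection hc with h; exact h.symm))]
      rfl
    · rw [pv_get?_erase_of_ne _ _ _ hpq, h6 p,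
        pv_index?_set_ne pages v.toNat (some page) (some p)
          (fun hk => by
            rw [← List.getD_eq_getElem _ _ hk, hqv]
            exact fun hc => hpq (by injection hc with h; exact h.symm))
          (fun hc => hp (by injection hc with h; exact h.symm))]

-- appending a rendered column to cols matches appending the formatted cells to each row
lemma pv_rows_cols_step (nm : Int)
    (pages' : List (Option Int)) (bi' star' : Option Int) (hsb : star' = bi')
    (reprs' : List String) (rows cols : List (List String)) (slot' : PySem.Dict Int Int)
    (hlen' : pages'.length = nm.toNat)
    (hrplen : reprs'.length = nm.toNat)
    (hrlen : rows.length = nm.toNat)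
    (h17 : ∀ f : Nat, f < nm.toNat →
        rows.getD f [] = cols.map (fun c => (PySem.List.pyGet? c ((f : Nat) : Int)).getD ""))
    (h5' : ∀ f : Nat, f < nm.toNat → PySem.Dict.get? slot' ((f : Nat) : Int) = pages'.getD f none)
    (hreprs' : ∀ f : Nat, f < nm.toNat → reprs'.getD f "" = pvCell0 (pages'.getD f none))
    (hbi' : ∀ j : Int, bi' = some j → 0 ≤ j ∧ j < nm ∧ pages'.getD j.toNat none ≠ none) :
    ∀ f : Nat, f < nm.toNat →
      (pvEmit reprs' bi' rows).getD f []
        = (cols ++ [(PySem.List.pyRange 0 nm 1).map (fun g => pvRender slot' g star')]).map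
            (fun c => (PySem.List.pyGet? c ((f : Nat) : Int)).getD "") := by
  intro f hf
  have hrowlen : ∀ r ∈ rows, r.length = cols.length := by
    intro r hr
    obtain ⟨j, hj, rfl⟩ := List.mem_iff_getElem.1 hr
    have hj' : j < nm.toNat := by omega
    have hx := h17 j hj'
    rw [List.getD_eq_getElem _ _ hj] at hx
    rw [hx]
    simp
  have hemit := pv_emit_eq pages' reprs' rows cols.length bi' (by omega) (by omega) hrowlen
    (fun g hg => hreprs' g (by omega))
    (by intro b hb
        obtain ⟨hb0, hb1, hb2⟩ := hbi' b hb
        exact ⟨hb0, by omega, hb2⟩)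
  rw [hemit]
  have hfr : f < rows.length := by omega
  rw [List.getD_eq_getElem _ _ (by simpa using hfr), List.getElem_mapIdx, List.map_append]
  simp only [List.map_cons, List.map_nil]
  rw [← List.getD_eq_getElem rows _ hfr, h17 f hf,
    pv_pyGet_col nm _ f (by omega), pv_render_eq_cell nm slot' pages' h5' f hf, hsb]

-- one reference preserves the simulation invariant
lemma pv_step_inv (nm : Int) (hm : 1 ≤ nm) (page : Int)
    (M : List (Option Int) × Option Int × Int × List String × List (List String) × List String × Int)
    (S : PySem.Dict Int Int × PySem.Dict Int Int × List Int × Int × Option Int ×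
         List (List String) × List String × Int)
    (h : pvInv nm M S) : pvInv nm (pvStepMid nm M page) (pvStepB nm S page) := by
  obtain ⟨pages, bi, ptr, reprs, rows, fault, tot⟩ := M
  obtain ⟨loc, slot, queue, nf, star, cols, fault', tot'⟩ := S
  obtain ⟨hfa, hto, hst, h4, h5, h6, h7, h8, h9, h10, h11, h12, h13, h15, h14, h16, h17, h18, h19⟩ := h
  have hm0 : (0 : Int) < nm := by omega
  by_cases hmem : (some page) ∈ pages
  · -- HIT
    obtain ⟨idx, hidx⟩ := Option.isSome_iff_exists.1
      ((PySem.List.index?_isSome_iff pages (some page)).2 hmem)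
    obtain ⟨hidxlt, hidxval, -⟩ := PySem.List.getElem_of_index?_eq_some hidx
    have hloc : PySem.Dict.get? loc page = some ((idx : Nat) : Int) := by
      rw [h6 page, hidx]; rfl
    have hstepM : pvStepMid nm (pages, bi, ptr, reprs, rows, fault, tot) page
        = (pages, some ((idx : Nat) : Int), ptr, reprs,
           pvEmit reprs (some ((idx : Nat) : Int)) rows, fault ++ [""], tot) := by
      simp only [pvStepMid, if_pos hmem, hidx, Option.getD_some]
    have hstepB : pvStepB nm (loc, slot, queue, nf, star, cols, fault', tot') page
        = (loc, slot, queue, nf, some ((idx : Nat) : Int),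
           cols ++ [(PySem.List.pyRange 0 nm 1).map
             (fun g => pvRender slot g (some ((idx : Nat) : Int)))], fault' ++ [""], tot') := by
      simp only [pvStepB, hloc]
    rw [hstepM, hstepB, hfa, hto]
    have hbiH : ∀ j : Int, (some ((idx : Nat) : Int) : Option Int) = some j →
        0 ≤ j ∧ j < nm ∧ pages.getD j.toNat none ≠ none := by
      intro j hj
      obtain rfl : ((idx : Nat) : Int) = j := by simpa using hj
      refine ⟨by omega, by omega, ?_⟩
      rw [Int.toNat_natCast, List.getD_eq_getElem _ _ hidxlt, hidxval]
      simp
    exact ⟨rfl, rfl, rfl, h4, h5, h6, h7, h8, h9, h10, h11, h12, h13, h15, h14,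
      by rw [pv_emit_length]; exact h16,
      pv_rows_cols_step nm pages (some ((idx : Nat) : Int)) (some ((idx : Nat) : Int)) rfl
        reprs rows cols slot h4 h15 h16 h17 h5 h14 hbiH,
      hbiH, h19⟩
  · -- MISS
    have hloc : PySem.Dict.get? loc page = none := by
      rw [h6 page, (PySem.List.index?_eq_none_iff pages (some page)).2 hmem]
      rfl
    by_cases hfree : nf < nm
    · -- a free frame exists (frame nf)
      have hnfN : nf.toNat < nm.toNat := by omega
      have hnone : pages.getD nf.toNat none = none := (h9 nf.toNat hnfN).2 (by omega)
      have hnoneElem : pages[nf.toNat]'(by omega) = none := by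
        rw [← List.getD_eq_getElem _ _ (by omega)]
        exact hnone
      have hmemnone : (none : Option Int) ∈ pages := hnoneElem ▸ List.getElem_mem _
      have hidxnone : PySem.List.index? pages none = some nf.toNat := by
        apply pv_index?_first _ _ _ (by omega) hnoneElem
        intro j hj hc
        have hj' : j < nm.toNat := by omega
        have := (h9 j hj').1 (by rw [List.getD_eq_getElem _ _ (by omega)]; exact hc)
        omega
      have hstepM : pvStepMid nm (pages, bi, ptr, reprs, rows, fault, tot) page
          = (pages.set nf.toNat (some page), bi, ptr,
             reprs.set nf.toNat (PySem.Int.toStr page),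
             pvEmit (reprs.set nf.toNat (PySem.Int.toStr page)) bi rows,
             fault ++ ["*"], tot + 1) := by
        simp only [pvStepMid, if_neg hmem, if_pos hmemnone, hidxnone, Option.getD_some]
      have hstepB : pvStepB nm (loc, slot, queue, nf, star, cols, fault', tot') page
          = (PySem.Dict.insert loc page nf, PySem.Dict.insert slot nf page, queue, nf + 1, star,
             cols ++ [(PySem.List.pyRange 0 nm 1).map
               (fun g => pvRender (PySem.Dict.insert slot nf page) g star)],
             fault' ++ ["*"], tot' + 1) := by
        simp only [pvStepB, hloc, if_pos hfree]
      rw [hstepM, hstepB, hfa, hto, hst]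
      have h5' := pv_slot_set nm slot pages nf h4 h7 hfree page h5
      have h6' := pv_loc_fill nm loc pages nf page h4 h7 hfree hmem hnone h6
      have h14' := pv_reprs_set nm reprs pages nf page h4 h15 h7 hfree h14
      have h19' := pv_distinct_set nm pages nf page h4 h7 hfree hmem h19
      have h18' : ∀ j : Int, bi = some j →
          0 ≤ j ∧ j < nm ∧ (pages.set nf.toNat (some page)).getD j.toNat none ≠ none := by
        intro j hj
        obtain ⟨hj0, hj1, hjv⟩ := h18 j hj
        refine ⟨hj0, hj1, ?_⟩
        have hne : nf.toNat ≠ j.toNat := fun hc => hjv (hc ▸ hnone)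
        rw [List.getD_eq_getElem?_getD, List.getElem?_set_ne hne, ← List.getD_eq_getElem?_getD]
        exact hjv
      refine ⟨rfl, rfl, rfl, by simp [h4], h5', h6', by omega, by omega, ?_, h10, h11, ?_, ?_,
        by simp [h15], h14', by rw [pv_emit_length]; exact h16,
        pv_rows_cols_step nm (pages.set nf.toNat (some page)) bi bi rfl
          (reprs.set nf.toNat (PySem.Int.toStr page)) rows cols (PySem.Dict.insert slot nf page)
          (by simp [h4]) (by simp [h15]) h16 h17 h5' h14' h18',
        h18', h19'⟩
      · intro j hj
        by_cases hjv : j = nf.toNat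
        · subst hjv
          rw [List.getD_eq_getElem _ _ (by simp; omega), List.getElem_set, if_pos rfl]
          constructor
          · intro hc; exact absurd hc (by simp)
          · intro hc; exfalso; omega
        · rw [List.getD_eq_getElem?_getD, List.getElem?_set_ne (Ne.symm hjv),
            ← List.getD_eq_getElem?_getD, h9 j hj]
          omega
      · intro hc
        obtain ⟨hp0, hq0⟩ := h13 hfree
        subst hp0
        rw [hq0]
        simp [PySem.List.pyRange]
      · intro hc
        exact h13 (by omega)
    · -- no free frame: second-chance eviction at the queue head
      have hnf : nf = nm := by omega
      have hmemnone : (none : Option Int) ∉ pages := by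
        intro hmemn
        obtain ⟨j, hj, hv⟩ := List.mem_iff_getElem.1 hmemn
        have := (h9 j (by omega)).1 (by rw [List.getD_eq_getElem _ _ (by omega)]; exact hv)
        omega
      have hq := h12 hnf
      obtain ⟨hhead, hrot1⟩ := pv_rot_step nm ptr h10 h11
      have hpop : PySem.List.pop? queue 0
          = some (ptr, PySem.List.pyRange (ptr + 1) nm 1 ++ PySem.List.pyRange 0 ptr 1) := by
        rw [hq, hhead]
        exact PySem.List.pop?_zero_cons _ _
      set p1 := PySem.Int.mod (ptr + 1) nm with hp1def
      have hp10 : 0 ≤ p1 := PySem.Int.mod_nonneg _ hm0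
      have hp11 : p1 < nm := PySem.Int.mod_lt _ hm0
      by_cases hbp : bi = some ptr
      · -- the queue head carries the bit: it is requeued, the next frame is the victim
        obtain ⟨hhead2, hrot2⟩ := pv_rot_step nm p1 hp10 hp11
        have hpop2 : PySem.List.pop?
            ((PySem.List.pyRange (ptr + 1) nm 1 ++ PySem.List.pyRange 0 ptr 1) ++ [ptr]) 0
            = some (p1, PySem.List.pyRange (p1 + 1) nm 1 ++ PySem.List.pyRange 0 p1 1) := by
          rw [hrot1, hhead2]
          exact PySem.List.pop?_zero_cons _ _
        obtain ⟨q, hqv⟩ : ∃ q, pages.getD p1.toNat none = some q := by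
          cases hx : pages.getD p1.toNat none with
          | none => exact absurd ((h9 p1.toNat (by omega)).1 hx) (by omega)
          | some q => exact ⟨q, rfl⟩
        have hslotf : PySem.Dict.get? slot p1 = some q := by
          have hh := h5 p1.toNat (by omega)
          rw [show ((p1.toNat : Nat) : Int) = p1 by omega] at hh
          rw [hh, hqv]
        have hstepM : pvStepMid nm (pages, bi, ptr, reprs, rows, fault, tot) page
            = (pages.set p1.toNat (some page), none, PySem.Int.mod (p1 + 1) nm,
               reprs.set p1.toNat (PySem.Int.toStr page),
               pvEmit (reprs.set p1.toNat (PySem.Int.toStr page)) none rows,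
               fault ++ ["*"], tot + 1) := by
          simp only [pvStepMid, if_neg hmem, if_neg hmemnone, if_pos hbp, ← hp1def]
        have hstepB : pvStepB nm (loc, slot, queue, nf, star, cols, fault', tot') page
            = (PySem.Dict.insert (PySem.Dict.erase loc q) page p1,
               PySem.Dict.insert slot p1 page,
               (PySem.List.pyRange (p1 + 1) nm 1 ++ PySem.List.pyRange 0 p1 1) ++ [p1], nf,
               none,
               cols ++ [(PySem.List.pyRange 0 nm 1).map
                 (fun g => pvRender (PySem.Dict.insert slot p1 page) g none)],
               fault' ++ ["*"], tot' + 1) := by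
          simp only [pvStepB, hloc, if_neg hfree, hpop,
            if_pos (show star = some ptr from hst.trans hbp), hpop2, hslotf]
        rw [hstepM, hstepB, hfa, hto]
        have h5' := pv_slot_set nm slot pages p1 h4 hp10 hp11 page h5
        have h6' := pv_loc_evict nm loc pages p1 page q h4 hp10 hp11 hmem hqv h6 h19
        have h14' := pv_reprs_set nm reprs pages p1 page h4 h15 hp10 hp11 h14
        have h19' := pv_distinct_set nm pages p1 page h4 hp10 hp11 hmem h19
        have h18' : ∀ j : Int, (none : Option Int) = some j →
            0 ≤ j ∧ j < nm ∧ (pages.set p1.toNat (some page)).getD j.toNat none ≠ none := by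
          intro j hj; cases hj
        refine ⟨rfl, rfl, rfl, by simp [h4], h5', h6', h7, h8, ?_,
          PySem.Int.mod_nonneg _ hm0, PySem.Int.mod_lt _ hm0,
          fun _ => hrot2, fun hc => absurd hc hfree,
          by simp [h15], h14', by rw [pv_emit_length]; exact h16,
          pv_rows_cols_step nm (pages.set p1.toNat (some page)) none none rfl
            (reprs.set p1.toNat (PySem.Int.toStr page)) rows cols
            (PySem.Dict.insert slot p1 page)
            (by simp [h4]) (by simp [h15]) h16 h17 h5' h14' h18',
          h18', h19'⟩
        intro j hj
        constructor
        · intro hc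
          exfalso
          by_cases hjv : j = p1.toNat
          · subst hjv
            rw [List.getD_eq_getElem _ _ (by simp; omega), List.getElem_set, if_pos rfl] at hc
            exact absurd hc (by simp)
          · rw [List.getD_eq_getElem?_getD, List.getElem?_set_ne (fun hx => hjv hx.symm),
              ← List.getD_eq_getElem?_getD] at hc
            have := (h9 j hj).1 hc
            omega
        · intro hc
          exfalso
          omega
      · -- the queue head has no bit: it is the victim
        obtain ⟨q, hqv⟩ : ∃ q, pages.getD ptr.toNat none = some q := by
          cases hx : pages.getD ptr.toNat none with
          | none => exact absurd ((h9 ptr.toNat (by omega)).1 hx) (by omega)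
          | some q => exact ⟨q, rfl⟩
        have hslotf : PySem.Dict.get? slot ptr = some q := by
          have hh := h5 ptr.toNat (by omega)
          rw [show ((ptr.toNat : Nat) : Int) = ptr by omega] at hh
          rw [hh, hqv]
        have hstepM : pvStepMid nm (pages, bi, ptr, reprs, rows, fault, tot) page
            = (pages.set ptr.toNat (some page), bi, p1,
               reprs.set ptr.toNat (PySem.Int.toStr page),
               pvEmit (reprs.set ptr.toNat (PySem.Int.toStr page)) bi rows,
               fault ++ ["*"], tot + 1) := by
          simp only [pvStepMid, if_neg hmem, if_neg hmemnone, if_neg hbp, ← hp1def]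
        have hstepB : pvStepB nm (loc, slot, queue, nf, star, cols, fault', tot') page
            = (PySem.Dict.insert (PySem.Dict.erase loc q) page ptr,
               PySem.Dict.insert slot ptr page,
               (PySem.List.pyRange (ptr + 1) nm 1 ++ PySem.List.pyRange 0 ptr 1) ++ [ptr], nf,
               star,
               cols ++ [(PySem.List.pyRange 0 nm 1).map
                 (fun g => pvRender (PySem.Dict.insert slot ptr page) g star)],
               fault' ++ ["*"], tot' + 1) := by
          simp only [pvStepB, hloc, if_neg hfree, hpop,
            if_neg (show ¬ star = some ptr from fun hc => hbp (hst.symm.trans hc)), hslotf]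
        rw [hstepM, hstepB, hfa, hto, hst]
        have h5' := pv_slot_set nm slot pages ptr h4 h10 h11 page h5
        have h6' := pv_loc_evict nm loc pages ptr page q h4 h10 h11 hmem hqv h6 h19
        have h14' := pv_reprs_set nm reprs pages ptr page h4 h15 h10 h11 h14
        have h19' := pv_distinct_set nm pages ptr page h4 h10 h11 hmem h19
        have h18' : ∀ j : Int, bi = some j →
            0 ≤ j ∧ j < nm ∧ (pages.set ptr.toNat (some page)).getD j.toNat none ≠ none := by
          intro j hj
          obtain ⟨hj0, hj1, hjv⟩ := h18 j hj
          refine ⟨hj0, hj1, ?_⟩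
          have hne : ptr.toNat ≠ j.toNat := by
            intro hc
            apply hbp
            rw [hj]
            congr 1
            omega
          rw [List.getD_eq_getElem?_getD, List.getElem?_set_ne hne, ← List.getD_eq_getElem?_getD]
          exact hjv
        refine ⟨rfl, rfl, rfl, by simp [h4], h5', h6', h7, h8, ?_,
          PySem.Int.mod_nonneg _ hm0, PySem.Int.mod_lt _ hm0,
          fun _ => hrot1, fun hc => absurd hc hfree,
          by simp [h15], h14', by rw [pv_emit_length]; exact h16,
          pv_rows_cols_step nm (pages.set ptr.toNat (some page)) bi bi rfl
            (reprs.set ptr.toNat (PySem.Int.toStr page)) rows cols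
            (PySem.Dict.insert slot ptr page)
            (by simp [h4]) (by simp [h15]) h16 h17 h5' h14' h18',
          h18', h19'⟩
        intro j hj
        constructor
        · intro hc
          exfalso
          by_cases hjv : j = ptr.toNat
          · subst hjv
            rw [List.getD_eq_getElem _ _ (by simp; omega), List.getElem_set, if_pos rfl] at hc
            exact absurd hc (by simp)
          · rw [List.getD_eq_getElem?_getD, List.getElem?_set_ne (fun hx => hjv hx.symm),
              ← List.getD_eq_getElem?_getD] at hc
            have := (h9 j hj).1 hc
            omega
        · intro hc
          exfalso
          omega

lemma pv_fold_inv (nm : Int) (hm : 1 ≤ nm) (l : List Int)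
    (M : List (Option Int) × Option Int × Int × List String × List (List String) × List String × Int)
    (S : PySem.Dict Int Int × PySem.Dict Int Int × List Int × Int × Option Int ×
         List (List String) × List String × Int)
    (h : pvInv nm M S) : pvInv nm (l.foldl (pvStepMid nm) M) (l.foldl (pvStepB nm) S) := by
  induction l generalizing M S with
  | nil => exact h
  | cons a t ih => exact ih _ _ (pv_step_inv nm hm a M S h)

-- the intermediate program equals B on every admitted input with at least one frame
lemma pv_mid_eq_alt (referencia : List Int) (num_marcos : Int) (hm : 1 ≤ num_marcos) :
    pvMid referencia num_marcos = fifo_mejorado_alt referencia num_marcos := by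
  have hinit : pvInv num_marcos
      (List.replicate num_marcos.toNat (none : Option Int), (none : Option Int), (0 : Int),
       List.replicate num_marcos.toNat "",
       List.replicate num_marcos.toNat ([] : List String), ([] : List String), (0 : Int))
      (PySem.Dict.empty, PySem.Dict.empty, PySem.List.pyRange 0 num_marcos 1, (0 : Int),
       (none : Option Int), ([] : List (List String)), ([] : List String), (0 : Int)) := by
    refine ⟨rfl, rfl, rfl, by simp, ?_, ?_, le_refl 0, by omega, ?_, le_refl 0, by omega,
      fun hc => absurd hc (by omega), fun _ => ⟨rfl, rfl⟩, by simp, ?_, by simp, ?_, ?_, ?_⟩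
    · intro f hf
      rw [PySem.Dict.get?_empty, List.getD_replicate _ hf]
    · intro p
      rw [PySem.Dict.get?_empty,
        (PySem.List.index?_eq_none_iff _ _).2 (by simp)]
      rfl
    · intro j hj
      rw [List.getD_replicate _ hj]
      simp
    · intro f hf
      simp [pvCell0]
    · intro f hf
      simp
    · intro j hj
      cases hj
    · intro i j hi hj hne
      rw [List.getD_replicate _ hi] at hne
      exact absurd rfl hne
  have hfin := pv_fold_inv num_marcos hm referencia _ _ hinit
  obtain ⟨⟨P, B, PT, RP, R, F, T⟩, hM⟩ :
      ∃ st, referencia.foldl (pvStepMid num_marcos)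
        (List.replicate num_marcos.toNat (none : Option Int), (none : Option Int), (0 : Int),
         List.replicate num_marcos.toNat "",
         List.replicate num_marcos.toNat ([] : List String), ([] : List String), (0 : Int))
        = st := ⟨_, rfl⟩
  obtain ⟨⟨L, SL, Q, NF, ST, C, F2, T2⟩, hS⟩ :
      ∃ st, referencia.foldl (pvStepB num_marcos)
        (PySem.Dict.empty, PySem.Dict.empty, PySem.List.pyRange 0 num_marcos 1, (0 : Int),
         (none : Option Int), ([] : List (List String)), ([] : List String), (0 : Int))
        = st := ⟨_, rfl⟩
  rw [hM, hS] at hfin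
  obtain ⟨hfa, hto, -, -, -, -, -, -, -, -, -, -, -, -, -, h16, h17, -, -⟩ := hfin
  rw [pvMid, fifo_mejorado_alt, hM, hS]
  have hrange : PySem.List.pyRange 0 num_marcos 1
      = (List.range num_marcos.toNat).map (fun k => ((k : Nat) : Int)) := by
    rw [show num_marcos = ((num_marcos.toNat : Nat) : Int) by omega]
    exact PySem.List.pyRange_zero_natCast _
  rw [hrange]
  have hrows : R = ((List.range num_marcos.toNat).map (fun k => ((k : Nat) : Int))).map
      (fun f => C.map (fun c => (PySem.List.pyGet? c f).getD "")) := by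
    apply List.ext_getElem
    · simp [h16]
    · intro k hk hk2
      have hkN : k < num_marcos.toNat := by omega
      have hR : R[k] = R.getD k [] := by rw [List.getD_eq_getElem _ _ hk]
      rw [hR, h17 k hkN, List.getElem_map, List.getElem_map, List.getElem_range]
  rw [hfa, hto, hrows]

-- ===== VERDICT (by name: the statement is the Claim_ definition above) =====
theorem fifo_mejorado_spec : Claim_equal_fifo_mejorado := by
  intro referencia num_marcos hdom hpre
  unfold Spec_fifo_mejorado
  rcases hpre with hm | ⟨hm, href⟩
  · rw [pv_A_eq_mid referencia num_marcos hm, pv_mid_eq_alt referencia num_marcos hm]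
  · subst hm href
    decide
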